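-- pv_equiv track=rewrite | github.com/catekat16/MusicCatalog_WebCrawler | musiccatalog_webcrawler.py | format_copynum
-- ===== SOURCE A (Python) =====
-- def format_copynum(song_title):
--     string1 = song_title
--     string1 = string1.split("-")
--     string_list = []
--     for string in string1:
--         string_list.append(string.split(" "))
--
--     flatten_list = sum(string_list, [])
--
--     length = 0
--     for i in range(len(flatten_list)):
--         length += len(flatten_list[i])
--
--     song_name = ""
--
--     for index in range(len(flatten_list)):
--         if index == 0:
--             song_name += flatten_list[index]
--             for j in range(12-length):
--                 song_name += "0"
--             continue
--         song_name += flatten_list[index]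
--
--     return song_name
-- ===== SOURCE B (Python) =====
-- def format_copynum(song_title):
--     # single state-machine pass over characters; no splitting at all
--     head = []
--     tail = []
--     seen_delim = False
--     for ch in song_title:
--         if ch == '-' or ch == ' ':
--             seen_delim = True
--         elif seen_delim:
--             tail.append(ch)
--         else:
--             head.append(ch)
--     pad = '0' * (12 - len(head) - len(tail))
--     return ''.join(head) + pad + ''.join(tail)
-- ===== Notes on version B (the rewrite author's own statement) =====
-- stated objective: alternative
-- what changed: B replaces A's split-on-'-' / split-on-' ' tokenization, flattening and index loops with a single character-level state-machine pass that accumulates the pre-first-delimiter prefix and the remaining non-delimiter characters, then pads with zeros.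
import Mathlib
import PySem

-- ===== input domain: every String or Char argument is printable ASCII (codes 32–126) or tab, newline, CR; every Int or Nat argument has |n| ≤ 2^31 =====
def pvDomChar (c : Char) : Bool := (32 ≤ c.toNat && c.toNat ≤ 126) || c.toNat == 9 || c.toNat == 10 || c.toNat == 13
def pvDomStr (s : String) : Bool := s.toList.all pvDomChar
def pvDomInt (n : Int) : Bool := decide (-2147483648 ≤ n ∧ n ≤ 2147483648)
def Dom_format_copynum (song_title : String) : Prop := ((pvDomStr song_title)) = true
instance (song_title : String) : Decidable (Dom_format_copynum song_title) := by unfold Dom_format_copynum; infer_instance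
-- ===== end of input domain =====

-- B replaces A's split/flatten/index-loop pipeline by one character-level state-machine
-- pass (head before first delimiter, remaining non-delimiter chars, zero padding) (objective: alternative).

-- ===== PORT A =====
def format_copynum (song_title : String) : String :=
  let string1 : List (List Char) := PySem.Chars.splitOn song_title.toList ['-']
  let string_list : List (List (List Char)) :=
    string1.foldl (fun acc st => acc ++ [PySem.Chars.splitOn st [' ']]) []
  let flatten_list : List (List Char) := string_list.foldl (fun acc x => acc ++ x) []
  let length : Int :=
    (PySem.List.pyRange 0 (flatten_list.length : Int) 1).foldl
      (fun acc i => acc + ((PySem.List.pyGetD flatten_list i []).length : Int)) 0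
  let song_name : List Char :=
    (PySem.List.pyRange 0 (flatten_list.length : Int) 1).foldl
      (fun song index =>
        if index == 0 then
          (PySem.List.pyRange 0 (12 - length) 1).foldl (fun s _ => s ++ ['0'])
            (song ++ PySem.List.pyGetD flatten_list index [])
        else song ++ PySem.List.pyGetD flatten_list index []) []
  String.ofList song_name

-- ===== PORT B =====
-- the loop body of B's single pass: state = (head, tail, seen_delim)
def pvStep (st : List Char × List Char × Bool) (ch : Char) : List Char × List Char × Bool :=
  if ch = '-' ∨ ch = ' ' then (st.1, st.2.1, true)
  else if st.2.2 then (st.1, st.2.1 ++ [ch], st.2.2)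
  else (st.1 ++ [ch], st.2.1, st.2.2)

def format_copynum_alt (song_title : String) : String :=
  let r := song_title.toList.foldl pvStep ([], [], false)
  String.ofList
    (r.1 ++ List.replicate ((12 - (r.1.length : Int) - (r.2.1.length : Int)).toNat) '0' ++ r.2.1)

-- ===== PRECONDITION & SPEC =====
def Spec_format_copynum (song_title : String) (out : String) : Prop := out = format_copynum_alt song_title
instance (song_title : String) (out : String) : Decidable (Spec_format_copynum song_title out) := by unfold Spec_format_copynum; infer_instance

-- ===== CLAIM (what is proved, stated in full; the proofs are below) =====
def Claim_equal_format_copynum : Prop := ∀ (song_title : String), Dom_format_copynum song_title → Spec_format_copynum song_title (format_copynum song_title)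

-- ===== LEMMAS AND PROOFS =====

-- prepend a char to the first piece (pieces are always nonempty, the [] case is unreachable)
def pvConsH (x : Char) : List (List Char) → List (List Char)
  | [] => [[x]]
  | h :: t => (x :: h) :: t

-- split on a single delimiter char, structurally
def pvSplit1 (c : Char) : List Char → List (List Char)
  | [] => [[]]
  | x :: xs => if x = c then [] :: pvSplit1 c xs else pvConsH x (pvSplit1 c xs)

-- split on either '-' or ' '
def pvSplit2 : List Char → List (List Char)
  | [] => [[]]
  | x :: xs => if x = '-' ∨ x = ' ' then [] :: pvSplit2 xs else pvConsH x (pvSplit2 xs)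

theorem pvSplit1_ne_nil (c : Char) (l : List Char) : pvSplit1 c l ≠ [] := by
  cases l with
  | nil => simp [pvSplit1]
  | cons x xs =>
    simp only [pvSplit1]
    split
    · simp
    · cases h : pvSplit1 c xs with
      | nil => simp [pvConsH]
      | cons a t => simp [pvConsH]

theorem pvSplit2_ne_nil (l : List Char) : pvSplit2 l ≠ [] := by
  cases l with
  | nil => simp [pvSplit2]
  | cons x xs =>
    simp only [pvSplit2]
    split
    · simp
    · cases h : pvSplit2 xs with
      | nil => simp [pvConsH]
      | cons a t => simp [pvConsH]

theorem pvSplitOn_go_single (c : Char) :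
    ∀ (l : List Char) (fuel : Nat) (cur : List Char) (acc : List (List Char)),
      l.length < fuel →
      PySem.Chars.splitOn.go [c] fuel l cur acc =
        acc.reverse ++ (match pvSplit1 c l with
                        | [] => [cur.reverse]
                        | h :: t => (cur.reverse ++ h) :: t) := by
  intro l
  induction l with
  | nil =>
    intro fuel cur acc h
    cases fuel with
    | zero => omega
    | succ f => simp [PySem.Chars.splitOn.go, pvSplit1]
  | cons x xs ih =>
    intro fuel cur acc h
    cases fuel with
    | zero => omega
    | succ f =>
      by_cases hx : x = c
      · subst hx
        have hpre : [x].isPrefixOf (x :: xs) = true := by simp [List.isPrefixOf]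
        simp only [PySem.Chars.splitOn.go, hpre, if_true]
        rw [show List.drop [x].length (x :: xs) = xs from rfl]
        rw [ih f [] (List.reverse cur :: acc) (by simpa using Nat.lt_of_succ_lt_succ h)]
        simp only [pvSplit1]
        cases hs : pvSplit1 x xs with
        | nil => exact absurd hs (pvSplit1_ne_nil x xs)
        | cons a t => simp
      · have hpre : [c].isPrefixOf (x :: xs) = false := by
          simp [List.isPrefixOf]
          intro hcx; exact absurd hcx.symm hx
        simp only [PySem.Chars.splitOn.go, hpre, Bool.false_eq_true, if_false]
        rw [ih f (x :: cur) acc (by simpa using Nat.lt_of_succ_lt_succ h)]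
        simp only [pvSplit1, if_neg hx]
        cases hs : pvSplit1 c xs with
        | nil => exact absurd hs (pvSplit1_ne_nil c xs)
        | cons a t => simp [pvConsH]

theorem pvSplitOn_single (c : Char) (l : List Char) :
    PySem.Chars.splitOn l [c] = pvSplit1 c l := by
  have := pvSplitOn_go_single c l (l.length + 1) [] [] (by omega)
  simp only [PySem.Chars.splitOn] at *
  rw [this]
  cases hs : pvSplit1 c l with
  | nil => exact absurd hs (pvSplit1_ne_nil c l)
  | cons a t => simp

theorem pvConsH_append (x : Char) (a b : List (List Char)) (h : a ≠ []) :
    pvConsH x a ++ b = pvConsH x (a ++ b) := by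
  cases a with
  | nil => exact absurd rfl h
  | cons h t => simp [pvConsH]

-- A's flatten of per-piece splits equals the two-delimiter split
theorem pvA_tokens (l : List Char) :
    ((pvSplit1 '-' l).map (pvSplit1 ' ')).flatten = pvSplit2 l := by
  induction l with
  | nil => rfl
  | cons x xs ih =>
    by_cases hx : x = '-'
    · subst hx
      simp only [pvSplit1, pvSplit2]
      simp [pvSplit1, ih]
    · simp only [pvSplit1, if_neg hx, pvSplit2]
      cases hs : pvSplit1 '-' xs with
      | nil => exact absurd hs (pvSplit1_ne_nil '-' xs)
      | cons a t =>
        rw [hs] at ih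
        simp only [pvConsH, List.map_cons, List.flatten_cons]
        by_cases hsp : x = ' '
        · subst hsp
          simp only [pvSplit1]
          simp only [List.map_cons, List.flatten_cons] at ih
          simp [ih, hx]
        · simp only [pvSplit1, hx, hsp, or_self, if_false]
          simp only [List.map_cons, List.flatten_cons] at ih
          rw [← ih]
          rw [pvConsH_append x _ _ (pvSplit1_ne_nil ' ' a)]
          cases pvSplit1 ' ' a ++ (List.map (pvSplit1 ' ') t).flatten <;> rfl

theorem pvFoldl_append_flatten {α : Type} (l : List (List α)) (acc : List α) :
    l.foldl (fun acc x => acc ++ x) acc = acc ++ l.flatten := by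
  induction l generalizing acc with
  | nil => simp
  | cons a t ih => simp [ih, List.append_assoc]

theorem pvZeros_fold (r : List Int) (init : List Char) :
    r.foldl (fun s _ => s ++ ['0']) init = init ++ List.replicate r.length '0' := by
  induction r generalizing init with
  | nil => simp
  | cons a t ih =>
    rw [List.foldl_cons, ih, List.append_assoc, List.singleton_append, ← List.replicate_succ,
      List.length_cons]

theorem pvLen_fold (l : List (List Char)) (acc : Int) :
    l.foldl (fun acc p => acc + (p.length : Int)) acc = acc + (l.flatten.length : Int) := by
  induction l generalizing acc with
  | nil => simp
  | cons a t ih => simp [ih]; omega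

theorem pvTail_fold (xs : List (List Char)) (r : List Int) (acc : List Char)
    (len : Int)
    (hr : ∀ i ∈ r, i ≠ 0) :
    r.foldl (fun song index =>
        if index == 0 then
          (PySem.List.pyRange 0 (12 - len) 1).foldl (fun s _ => s ++ ['0'])
            (song ++ PySem.List.pyGetD xs index [])
        else song ++ PySem.List.pyGetD xs index []) acc
      = acc ++ (r.map (fun j => PySem.List.pyGetD xs j [])).flatten := by
  induction r generalizing acc with
  | nil => simp
  | cons a t ih =>
    have ha : a ≠ 0 := hr a (by simp)
    simp only [beq_iff_eq] at ih ⊢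
    simp only [List.foldl_cons, if_neg ha, List.map_cons, List.flatten_cons]
    rw [ih _ (fun i hi => hr i (by simp [hi]))]
    simp [List.append_assoc]

-- the non-delimiter characters of l are the flatten of its two-delimiter split
theorem pvFlatten_split2 (l : List Char) :
    (pvSplit2 l).flatten = l.filter (fun x => !(x == '-' || x == ' ')) := by
  induction l with
  | nil => rfl
  | cons x xs ih =>
    by_cases hx : x = '-' ∨ x = ' '
    · simp only [pvSplit2, if_pos hx, List.flatten_cons, List.nil_append, ih]
      rcases hx with h | h <;> subst h <;> simp
    · push_neg at hx
      simp only [pvSplit2, if_neg (by tauto : ¬(x = '-' ∨ x = ' '))]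
      cases hs : pvSplit2 xs with
      | nil => exact absurd hs (pvSplit2_ne_nil xs)
      | cons a t =>
        rw [hs] at ih
        rw [show List.filter (fun x => !(x == '-' || x == ' ')) (x :: xs)
            = x :: List.filter (fun x => !(x == '-' || x == ' ')) xs from by
          simp [List.filter_cons, hx.1, hx.2]]
        simp only [pvConsH]
        rw [List.flatten_cons, List.cons_append, ← List.flatten_cons, ih]

-- after the first delimiter, the scan only appends non-delimiter chars to tail
theorem pvScan_true (l : List Char) (h t : List Char) :
    l.foldl pvStep (h, t, true) =
      (h, t ++ l.filter (fun x => !(x == '-' || x == ' ')), true) := by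
  induction l generalizing t with
  | nil => simp
  | cons x xs ih =>
    by_cases hx : x = '-' ∨ x = ' '
    · simp only [List.foldl_cons, pvStep, if_pos hx, ih]
      rcases hx with hh | hh <;> subst hh <;> simp
    · push_neg at hx
      simp only [List.foldl_cons, pvStep, if_neg (by tauto : ¬(x = '-' ∨ x = ' '))]
      simp [ih, List.filter_cons, hx.1, hx.2]

-- before any delimiter, the scan computes the head token and the flattened rest
theorem pvScan_false (l : List Char) (h t : List Char) :
    l.foldl pvStep (h, t, false) =
      (h ++ (pvSplit2 l).headD [], t ++ (pvSplit2 l).tail.flatten,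
        !(pvSplit2 l).tail.isEmpty) := by
  induction l generalizing h with
  | nil => simp [pvSplit2]
  | cons x xs ih =>
    by_cases hx : x = '-' ∨ x = ' '
    · simp only [List.foldl_cons, pvStep, if_pos hx]
      rw [pvScan_true]
      simp only [pvSplit2, if_pos hx, List.headD_cons, List.tail_cons]
      rw [pvFlatten_split2]
      cases hs : pvSplit2 xs with
      | nil => exact absurd hs (pvSplit2_ne_nil xs)
      | cons a t' => simp
    · push_neg at hx
      simp only [List.foldl_cons, pvStep,
        if_neg (by tauto : ¬(x = '-' ∨ x = ' ')), Bool.false_eq_true, if_false]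
      rw [ih]
      simp only [pvSplit2, if_neg (by tauto : ¬(x = '-' ∨ x = ' '))]
      cases hs : pvSplit2 xs with
      | nil => exact absurd hs (pvSplit2_ne_nil xs)
      | cons a t' => simp [pvConsH]

-- ===== VERDICT (by name: the statement is the Claim_ definition above) =====
theorem format_copynum_spec : Claim_equal_format_copynum := by
  intro song_title _
  unfold Spec_format_copynum format_copynum format_copynum_alt
  simp only []
  set l := song_title.toList with hl
  have hA : ((PySem.Chars.splitOn l ['-']).foldl
      (fun acc st => acc ++ [PySem.Chars.splitOn st [' ']]) []).foldl
      (fun acc x => acc ++ x) [] = pvSplit2 l := by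
    rw [PySem.List.foldl_append_singleton_eq_map]
    rw [pvFoldl_append_flatten]
    simp only [List.nil_append]
    rw [pvSplitOn_single]
    have : (pvSplit1 '-' l).map (fun st => PySem.Chars.splitOn st [' '])
         = (pvSplit1 '-' l).map (pvSplit1 ' ') := by
      apply List.map_congr_left; intro a _; exact pvSplitOn_single ' ' a
    rw [this, pvA_tokens]
  rw [hA, pvScan_false]
  cases htok : pvSplit2 l with
  | nil => exact absurd htok (pvSplit2_ne_nil l)
  | cons t rest =>
    rw [PySem.List.foldl_pyRange_zero_pyGetD' (t :: rest) ([] : List Char)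
        (fun acc p => acc + (p.length : Int)) 0]
    rw [pvLen_fold]
    rw [PySem.List.pyRange_one_cons (a := 0) (b := (((t :: rest).length : Nat) : Int))
        (by exact_mod_cast Nat.succ_pos rest.length)]
    simp only [List.foldl_cons, beq_self_eq_true, if_true]
    rw [pvZeros_fold, pvTail_fold _ _ _ _
        (fun i hi => by
          have := (PySem.List.mem_pyRange_one).1 hi
          omega)]
    have hmap := PySem.List.map_pyGetD_pyRange (t :: rest) ([] : List Char) (a := 1) (by omega)
    simp only [zero_add, List.nil_append, PySem.List.pyGetD_zero_cons, List.tail_cons,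
      PySem.List.length_pyRange_one] at hmap ⊢
    simp only [PySem.List.len_eq, Int.toNat_one] at hmap
    rw [hmap]
    simp [List.flatten_cons, List.append_assoc]
    congr 2
    omega
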